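-- pv_equiv track=rewrite | github.com/shikgom2/boj | 32027.py | check
-- ===== SOURCE A (Python) =====
-- def check(li):
--     ans = 0
--     # check left
--     max_height = 0
--     for i in range(len(li)):
--         if li[i][1] == 'R':
--             max_height = max(max_height, li[i][0])
--         else:
--             if max_height < li[i][0]:
--                 max_height = li[i][0]
--                 ans += 1
--
--     # check right
--     max_height = 0
--     for i in range(len(li) - 1, -1, -1):
--         if li[i][1] == 'L':
--             max_height = max(max_height, li[i][0])
--         else:
--             if max_height < li[i][0]:
--                 max_height = li[i][0]
--                 ans += 1
--     return ans
-- ===== SOURCE B (Python) =====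
-- def check(li):
--     heights = [h for h, _ in li]
--     n = len(heights)
--     # pre[i] = max of heights[:i], seeded 0; suf[i] = max of heights[i:], seeded 0
--     pre = [0] * (n + 1)
--     for i in range(n):
--         pre[i + 1] = max(pre[i], heights[i])
--     suf = [0] * (n + 1)
--     for i in range(n - 1, -1, -1):
--         suf[i] = max(suf[i + 1], heights[i])
--     left = sum(1 for i, (h, d) in enumerate(li) if d != 'R' and h > pre[i])
--     right = sum(1 for i, (h, d) in enumerate(li) if d != 'L' and h > suf[i + 1])
--     return left + right
-- ===== Notes on version B (the rewrite author's own statement) =====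
-- stated objective: alternative
-- what changed: Replaces A's two interleaved update-and-count loops by precomputed prefix-max and suffix-max tables (seeded 0) followed by two pure counting passes over the enumerated list.
import Mathlib
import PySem

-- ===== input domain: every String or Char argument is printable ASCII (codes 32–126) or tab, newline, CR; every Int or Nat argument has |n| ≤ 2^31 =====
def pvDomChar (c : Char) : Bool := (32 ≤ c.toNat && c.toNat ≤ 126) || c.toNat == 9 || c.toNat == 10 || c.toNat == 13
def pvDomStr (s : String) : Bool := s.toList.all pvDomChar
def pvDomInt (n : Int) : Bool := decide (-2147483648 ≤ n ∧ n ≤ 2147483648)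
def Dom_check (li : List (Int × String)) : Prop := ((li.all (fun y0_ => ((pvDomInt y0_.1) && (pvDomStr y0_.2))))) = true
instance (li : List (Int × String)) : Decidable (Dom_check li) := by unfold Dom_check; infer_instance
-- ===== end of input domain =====

-- B replaces A's interleaved update-and-count loops by prefix/suffix-max tables plus two
-- counting passes; same O(n) cost, different decomposition (objective: alternative).

-- ===== PORT A =====
-- left pass then right pass (the Python indexes backwards; ported as foldl over reverse),
-- state = (ans, max_height), ans carried from the first loop into the second
def check (li : List (Int × String)) : Int :=
  let s1 := li.foldl (fun (st : Int × Int) e =>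
      if e.2 == "R" then (st.1, max st.2 e.1)
      else if st.2 < e.1 then (st.1 + 1, e.1) else st) ((0 : Int), (0 : Int))
  let s2 := li.reverse.foldl (fun (st : Int × Int) e =>
      if e.2 == "L" then (st.1, max st.2 e.1)
      else if st.2 < e.1 then (st.1 + 1, e.1) else st) (s1.1, (0 : Int))
  s2.1

-- ===== PORT B =====
-- Source B's running-max table loops are exactly List.scanl max 0 (the suffix one built from the right)
def check_alt (li : List (Int × String)) : Int :=
  let heights := li.map Prod.fst
  let pre := heights.scanl max 0
  let suf := (heights.reverse.scanl max 0).reverse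
  let left := ((li.zip pre).filter (fun p => p.1.2 != "R" && decide (p.2 < p.1.1))).length
  let right := ((li.zip suf.tail).filter (fun p => p.1.2 != "L" && decide (p.2 < p.1.1))).length
  (left : Int) + (right : Int)

-- ===== PRECONDITION & SPEC =====
def Spec_check (li : List (Int × String)) (out : Int) : Prop := out = check_alt li
instance (li : List (Int × String)) (out : Int) : Decidable (Spec_check li out) := by unfold Spec_check; infer_instance

-- ===== CLAIM (what is proved, stated in full; the proofs are below) =====
def Claim_equal_check : Prop := ∀ (li : List (Int × String)), Dom_check li → Spec_check li (check li)

-- ===== LEMMAS AND PROOFS =====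

/-- Count produced by one of A's passes, abstracted over the skipped direction. -/
def pvCount (dir : String) : List (Int × String) → Int → Int
  | [], _ => 0
  | e :: t, m =>
    if e.2 == dir then pvCount dir t (max m e.1)
    else if m < e.1 then 1 + pvCount dir t e.1 else pvCount dir t m

theorem pv_fold_count (dir : String) (li : List (Int × String)) :
    ∀ (ans m : Int),
      (li.foldl (fun (st : Int × Int) e =>
        if e.2 == dir then (st.1, max st.2 e.1)
        else if st.2 < e.1 then (st.1 + 1, e.1) else st) (ans, m)).1
      = ans + pvCount dir li m := by
  induction li with
  | nil => intro ans m; simp [pvCount]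
  | cons e t ih =>
    intro ans m
    simp only [List.foldl_cons, pvCount]
    by_cases h : (e.2 == dir) = true
    · rw [if_pos h, if_pos h]; exact ih _ _
    · rw [if_neg h, if_neg h]
      by_cases h2 : m < e.1
      · rw [if_pos h2, if_pos h2, ih]; ring
      · rw [if_neg h2, if_neg h2]; exact ih _ _

theorem pv_count_zip (dir : String) (li : List (Int × String)) :
    ∀ (m : Int),
      pvCount dir li m
      = (((li.zip ((li.map Prod.fst).scanl max m)).filter
            (fun p => p.1.2 != dir && decide (p.2 < p.1.1))).length : Int) := by
  induction li with
  | nil => intro m; simp [pvCount]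
  | cons e t ih =>
    intro m
    by_cases h : e.2 == dir
    · have : (e.2 != dir) = false := by simpa using h
      simp [pvCount, h, List.scanl, this, ih]
    · have hne : (e.2 != dir) = true := by simpa using h
      by_cases h2 : m < e.1
      · have hmx : max m e.1 = e.1 := max_eq_right (le_of_lt h2)
        simp [pvCount, h, h2, List.scanl, hne, hmx, ih]
        ring
      · have hmx : max m e.1 = m := max_eq_left (le_of_not_gt h2)
        simp [pvCount, h, h2, List.scanl, hne, hmx, ih]

theorem pv_zip_rev (li : List (Int × String)) (s : List Int)
    (hs : s.length = li.length + 1) :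
    li.reverse.zip s = (li.zip s.reverse.tail).reverse := by
  apply List.ext_getElem
  · simp [hs]
  · intro i h1 h2
    have hi : i < li.length := by simpa [hs] using h1
    simp only [List.getElem_zip, List.getElem_reverse, List.getElem_tail,
      List.length_zip, List.length_tail, List.length_reverse, hs]
    congr 1
    · congr 1; omega
    · congr 1; omega

-- ===== VERDICT (by name: the statement is the Claim_ definition above) =====
theorem check_spec : Claim_equal_check := by
  intro li _
  unfold Spec_check
  simp only [check, check_alt]
  rw [pv_fold_count "L" li.reverse]
  rw [pv_fold_count "R" li 0 0]
  rw [pv_count_zip "R" li 0, pv_count_zip "L" li.reverse 0]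
  have hmap : li.reverse.map Prod.fst = (li.map Prod.fst).reverse := by
    simp
  rw [hmap]
  have hs : ((li.map Prod.fst).reverse.scanl max 0).length = li.length + 1 := by
    simp
  rw [pv_zip_rev li _ hs]
  simp
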